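-- pv_equiv track=rewrite | github.com/Kylmakalle/apple-notes-exporter | scripts/organize.py | count_notes
-- ===== SOURCE A (Python) =====
-- DELIMITER = "^"
--
-- def parse_filename(file):
--     """Parse the filename to extract folder_name, note_name, and creation_date."""
--     parts = file.split(DELIMITER)
--     if len(parts) >= 3:
--         creation_date = parts[0]
--         folder_name = parts[1]
--         note_name = parts[2]
--         return folder_name, note_name, creation_date
--     return None, None, None
--
-- def count_notes(files):
--     """Count the number of occurrences of each note to detect duplicates."""
--     notes_count = {}
--     for file in files:
--         folder_name, note_name, creation_date = parse_filename(file)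
--         if folder_name and note_name and creation_date:
--             if folder_name not in notes_count:
--                 notes_count[folder_name] = {}
--             if note_name not in notes_count[folder_name]:
--                 notes_count[folder_name][note_name] = []
--             if creation_date not in notes_count[folder_name][note_name]:
--                 notes_count[folder_name][note_name].append(creation_date)
--     return notes_count
-- ===== SOURCE B (Python) =====
-- DELIMITER = "^"
--
-- def count_notes(files):
--     """Count the number of occurrences of each note to detect duplicates."""
--     # pass 1: group all creation dates (with duplicates) by folder/note
--     grouped = {}
--     for file in files:
--         parts = file.split(DELIMITER)
--         if len(parts) >= 3 and parts[1] and parts[2] and parts[0]: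
--             grouped.setdefault(parts[1], {}).setdefault(parts[2], []).append(parts[0])
--     # pass 2: collapse each date list to unique values, first-occurrence order
--     return {folder: {note: list(dict.fromkeys(dates)) for note, dates in notes.items()}
--             for folder, notes in grouped.items()}
-- ===== Notes on version B (the rewrite author's own statement) =====
-- stated objective: alternative
-- what changed: B splits A's single loop with an inline membership-checked append into two passes: first group every creation date (duplicates included) into nested dicts via setdefault, then collapse each date list to unique first-occurrence order with dict.fromkeys.
import Mathlib
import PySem

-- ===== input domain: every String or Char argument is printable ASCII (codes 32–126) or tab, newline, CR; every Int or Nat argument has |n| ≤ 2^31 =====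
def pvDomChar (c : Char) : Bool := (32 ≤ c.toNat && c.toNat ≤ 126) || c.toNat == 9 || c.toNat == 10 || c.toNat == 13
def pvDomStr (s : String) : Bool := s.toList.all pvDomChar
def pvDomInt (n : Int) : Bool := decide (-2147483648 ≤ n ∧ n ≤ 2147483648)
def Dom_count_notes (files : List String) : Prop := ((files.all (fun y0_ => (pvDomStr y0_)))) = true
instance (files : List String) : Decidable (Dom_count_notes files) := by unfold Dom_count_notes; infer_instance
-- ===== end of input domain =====

-- B separates grouping (append every date unconditionally) from deduplication (a second
-- whole-structure pass with dict.fromkeys); same result, different decomposition.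

-- ===== PORT A =====
-- parse_filename: split on "^" (split? is some because the separator is nonempty);
-- on ≥ 3 parts return (folder, note, date) = (parts[1], parts[2], parts[0]), else Nones.
def parse_filename (file : String) : Option String × Option String × Option String :=
  let parts := (PySem.Str.split? file "^").getD []
  if 3 ≤ parts.length then
    (some (parts.getD 1 ""), some (parts.getD 2 ""), some (parts.getD 0 ""))
  else (none, none, none)

-- "if creation_date not in list: list.append(creation_date)" on the inner date list
def pyAddDate (ds : List String) (c : String) : List String :=
  if c ∈ ds then ds else ds ++ [c]

-- dict mutation "if note not in d: d[note] = []" then the conditional inner append, on the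
-- assoc list representing the inner dict (update first matching key; new key appended at end)
def pyUpdNote : List (String × List String) → String → String → List (String × List String)
  | [], n, c => [(n, pyAddDate [] c)]
  | (k, v) :: rest, n, c =>
      if k = n then (k, pyAddDate v c) :: rest else (k, v) :: pyUpdNote rest n c

-- outer dict mutation "if folder not in notes_count: notes_count[folder] = {}" + inner update
def pyUpdFolder : List (String × List (String × List String)) → String → String → String →
    List (String × List (String × List String))
  | [], f, n, c => [(f, pyUpdNote [] n c)]
  | (k, v) :: rest, f, n, c =>
      if k = f then (k, pyUpdNote v n c) :: rest else (k, v) :: pyUpdFolder rest f n c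

-- the body of A's for-loop
def loopA (acc : List (String × List (String × List String))) (file : String) :
    List (String × List (String × List String)) :=
  match parse_filename file with
  | (some f, some n, some c) =>
      -- "if folder_name and note_name and creation_date": None and "" are falsy
      if f ≠ "" ∧ n ≠ "" ∧ c ≠ "" then pyUpdFolder acc f n c else acc
  | _ => acc

def count_notes (files : List String) : List (String × List (String × List String)) :=
  files.foldl loopA []

-- ===== PORT B =====
-- pass 1: setdefault + unconditional append of the date into the nested assoc lists
def altUpdNote : List (String × List String) → String → String → List (String × List String)
  | [], n, c => [(n, [c])]
  | (k, v) :: rest, n, c =>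
      if k = n then (k, v ++ [c]) :: rest else (k, v) :: altUpdNote rest n c

def altUpdFolder : List (String × List (String × List String)) → String → String → String →
    List (String × List (String × List String))
  | [], f, n, c => [(f, altUpdNote [] n c)]
  | (k, v) :: rest, f, n, c =>
      if k = f then (k, altUpdNote v n c) :: rest else (k, v) :: altUpdFolder rest f n c

-- the body of B's first loop (same filtering guard as A, inlined)
def loopB (acc : List (String × List (String × List String))) (file : String) :
    List (String × List (String × List String)) :=
  let parts := (PySem.Str.split? file "^").getD []
  if 3 ≤ parts.length ∧ parts.getD 1 "" ≠ "" ∧ parts.getD 2 "" ≠ "" ∧ parts.getD 0 "" ≠ "" then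
    altUpdFolder acc (parts.getD 1 "") (parts.getD 2 "") (parts.getD 0 "")
  else acc

def count_notes_alt (files : List String) : List (String × List (String × List String)) :=
  let grouped := files.foldl loopB []
  -- pass 2: list(dict.fromkeys(dates)) = PySem.List.dedup (first occurrences, in order)
  grouped.map (fun p => (p.1, p.2.map (fun q => (q.1, PySem.List.dedup q.2))))

-- ===== PRECONDITION & SPEC =====
def Spec_count_notes (files : List String) (out : List (String × List (String × List String))) : Prop := out = count_notes_alt files
instance (files : List String) (out : List (String × List (String × List String))) : Decidable (Spec_count_notes files out) := by unfold Spec_count_notes; infer_instance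

-- ===== CLAIM (what is proved, stated in full; the proofs are below) =====
def Claim_equal_count_notes : Prop := ∀ (files : List String), Dom_count_notes files → Spec_count_notes files (count_notes files)

-- ===== LEMMAS AND PROOFS =====

-- B's deduplication pass, named for the proofs
def post (s : List (String × List (String × List String))) : List (String × List (String × List String)) :=
  s.map (fun p => (p.1, p.2.map (fun q => (q.1, PySem.List.dedup q.2))))

-- deduplicating after one more append = A's conditional append on the deduplicated list
lemma dedup_append_singleton (ds : List String) (c : String) :
    PySem.List.dedup (ds ++ [c]) = pyAddDate (PySem.List.dedup ds) c := by
  simp only [PySem.List.dedup, PySem.Set.ofList, List.foldl_append, List.foldl,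
    PySem.Set.add, pyAddDate]
  simp

lemma updNote_post (nd : List (String × List String)) (n c : String) :
    (altUpdNote nd n c).map (fun q => (q.1, PySem.List.dedup q.2)) =
      pyUpdNote (nd.map (fun q => (q.1, PySem.List.dedup q.2))) n c := by
  induction nd with
  | nil =>
      simp only [altUpdNote, pyUpdNote, List.map, pyAddDate]
      rfl
  | cons kv rest ih =>
      obtain ⟨k, v⟩ := kv
      by_cases h : k = n
      · simp only [altUpdNote, pyUpdNote, h, if_pos, List.map,
          dedup_append_singleton]
      · simp only [altUpdNote, pyUpdNote, h, if_neg, List.map, ih, not_false_iff]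

lemma updFolder_post (s : List (String × List (String × List String))) (f n c : String) :
    post (altUpdFolder s f n c) = pyUpdFolder (post s) f n c := by
  induction s with
  | nil =>
      simp only [post, altUpdFolder, pyUpdFolder, List.map, updNote_post]
  | cons kv rest ih =>
      obtain ⟨k, v⟩ := kv
      by_cases h : k = f
      · simp only [post, altUpdFolder, pyUpdFolder, h, if_pos, List.map]
        rw [updNote_post]
      · simp only [post, altUpdFolder, pyUpdFolder, h, if_neg, List.map, not_false_iff]
        simp only [post] at ih; rw [ih]

-- one loop step of A on the deduplicated state = deduplicating after one loop step of B
lemma step_post (s : List (String × List (String × List String))) (file : String) :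
    loopA (post s) file = post (loopB s file) := by
  unfold loopA loopB parse_filename
  by_cases h3 : 3 ≤ ((PySem.Str.split? file "^").getD []).length
  · simp only [h3, if_pos, true_and]
    by_cases hg : ((PySem.Str.split? file "^").getD []).getD 1 "" ≠ "" ∧
        ((PySem.Str.split? file "^").getD []).getD 2 "" ≠ "" ∧
        ((PySem.Str.split? file "^").getD []).getD 0 "" ≠ ""
    · rw [if_pos hg, if_pos hg, updFolder_post]
    · rw [if_neg hg, if_neg hg]
  · simp [h3]

lemma fold_invariant (files : List String) (s : List (String × List (String × List String))) :
    files.foldl loopA (post s) = post (files.foldl loopB s) := by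
  induction files generalizing s with
  | nil => rfl
  | cons file rest ih => simp only [List.foldl, step_post, ih]

-- ===== VERDICT (by name: the statement is the Claim_ definition above) =====
theorem count_notes_spec : Claim_equal_count_notes := by
  intro files _
  unfold Spec_count_notes count_notes count_notes_alt
  have h := fold_invariant files []
  simpa [post] using h
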